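-- pv_equiv track=rewrite | github.com/justinxu421/recipe_rex | feature_generation/label_recipes.py | label_all_meats
-- ===== SOURCE A (Python) =====
-- def label_meat(ing, include, exclude):
--     for i_ in ing:
--         i_ = i_.lower()
--         # check if any meats are present in ingredient
--         for meat in include:
--             if meat in i_:
--                 # check if all excluded terms are not present too
--                 if all([e not in i_ for e in exclude]):
--                     return 1
--     return 0
--
-- def label_all_meats(ing, label_names):
--     poultry = ['chicken', 'turkey', 'duck', 'quail', 'thigh', 'breast']
--     beef = ['beef', 'steak', 'ribeye', 'sirloin', 'oxtail', 'brisket', 'bison', 'dog', 'gyoza', 'lamb']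
--     pork = ['pork', 'bacon', 'ham', 'sausage', 'dog', 'spam', 'rib', 'pastrami', 'prosciutto']
--     fish = ['fish', 'tilapia', 'salmon', 'cod', 'flounder', 'tuna', 'sardine', 'barramundi', 'branzino', 'porgies', 'bass']
--     seafood = ['shrimp', 'octopus', 'oysters', 'clam', 'abalone', 'squid', 'calamari', 'seafood', 'crab', 'lobster', 'mussel', 'scallop', 'snail']
--     exclude = ['chicken stock', 'fish sauce']
--
--     poultry_ = label_meat(ing, poultry, exclude)
--     beef_ = label_meat(ing, beef, exclude)
--     pork_ = label_meat(ing, pork, exclude)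
--     fish_ = label_meat(ing, fish, exclude)
--     seafood_ = label_meat(ing, seafood, exclude)
--
--     label_map = {
--         'poultry': poultry_,
--         'beef': beef_,
--         'pork': pork_,
--         'fish': fish_,
--         'seafood': seafood_,
--     }
--
--     all_labels = []
--     for label in label_names:
--         all_labels.append(label_map[label])
--
--     # vegeterian is not any
--     veg = int(not any(all_labels))
--     all_labels.append(veg)
--     return all_labels
-- ===== SOURCE B (Python) =====
-- # One pass over the ingredients updating five flags at once, instead of five
-- # separate scans via label_meat.
-- POULTRY = ['chicken', 'turkey', 'duck', 'quail', 'thigh', 'breast']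
-- BEEF = ['beef', 'steak', 'ribeye', 'sirloin', 'oxtail', 'brisket', 'bison', 'dog', 'gyoza', 'lamb']
-- PORK = ['pork', 'bacon', 'ham', 'sausage', 'dog', 'spam', 'rib', 'pastrami', 'prosciutto']
-- FISH = ['fish', 'tilapia', 'salmon', 'cod', 'flounder', 'tuna', 'sardine', 'barramundi', 'branzino', 'porgies', 'bass']
-- SEAFOOD = ['shrimp', 'octopus', 'oysters', 'clam', 'abalone', 'squid', 'calamari', 'seafood', 'crab', 'lobster', 'mussel', 'scallop', 'snail']
-- EXCLUDE = ['chicken stock', 'fish sauce']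
--
-- def label_all_meats(ing, label_names):
--     p = b = k = f = s = 0
--     for i_ in ing:
--         l = i_.lower()
--         if any(e in l for e in EXCLUDE):
--             continue
--         if any(w in l for w in POULTRY):
--             p = 1
--         if any(w in l for w in BEEF):
--             b = 1
--         if any(w in l for w in PORK):
--             k = 1
--         if any(w in l for w in FISH):
--             f = 1
--         if any(w in l for w in SEAFOOD):
--             s = 1
--     label_map = {'poultry': p, 'beef': b, 'pork': k, 'fish': f, 'seafood': s}
--     all_labels = [label_map[label] for label in label_names]
--     all_labels.append(int(not any(all_labels)))
--     return all_labels
-- ===== Notes on version B (the rewrite author's own statement) =====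
-- stated objective: alternative
-- what changed: B fuses label_meat's five separate scans of the ingredient list into one pass that lowercases each ingredient once, skips it if an exclude term occurs, and sets all five category flags together.
import Mathlib
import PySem

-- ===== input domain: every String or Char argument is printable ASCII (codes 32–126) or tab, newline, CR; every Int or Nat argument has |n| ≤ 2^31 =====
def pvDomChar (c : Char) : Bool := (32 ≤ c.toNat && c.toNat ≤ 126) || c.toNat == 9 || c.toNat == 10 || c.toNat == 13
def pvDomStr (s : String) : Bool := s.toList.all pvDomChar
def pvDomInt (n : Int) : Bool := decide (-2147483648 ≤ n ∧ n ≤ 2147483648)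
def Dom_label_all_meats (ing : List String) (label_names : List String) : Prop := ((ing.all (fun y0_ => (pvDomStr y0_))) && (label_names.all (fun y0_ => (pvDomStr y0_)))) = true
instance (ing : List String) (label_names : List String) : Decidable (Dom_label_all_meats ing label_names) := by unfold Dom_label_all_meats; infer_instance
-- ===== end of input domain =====

-- B fuses the five label_meat scans into a single pass over the ingredient list; return value only.

-- ===== PORT A =====
def label_meat (ing include_ exclude : List String) : Int :=
  match ing with
  | [] => 0
  | i :: rest =>
    let l := PySem.Str.lower i
    if include_.any (fun meat => PySem.Str.isIn meat l && exclude.all (fun e => !(PySem.Str.isIn e l))) then 1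
    else label_meat rest include_ exclude

def label_all_meats (ing : List String) (label_names : List String) : List Int :=
  let poultry := ["chicken", "turkey", "duck", "quail", "thigh", "breast"]
  let beef := ["beef", "steak", "ribeye", "sirloin", "oxtail", "brisket", "bison", "dog", "gyoza", "lamb"]
  let pork := ["pork", "bacon", "ham", "sausage", "dog", "spam", "rib", "pastrami", "prosciutto"]
  let fish := ["fish", "tilapia", "salmon", "cod", "flounder", "tuna", "sardine", "barramundi", "branzino", "porgies", "bass"]
  let seafood := ["shrimp", "octopus", "oysters", "clam", "abalone", "squid", "calamari", "seafood", "crab", "lobster", "mussel", "scallop", "snail"]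
  let exclude := ["chicken stock", "fish sauce"]
  let poultry_ := label_meat ing poultry exclude
  let beef_ := label_meat ing beef exclude
  let pork_ := label_meat ing pork exclude
  let fish_ := label_meat ing fish exclude
  let seafood_ := label_meat ing seafood exclude
  let label_map : PySem.Dict String Int :=
    ((((PySem.Dict.empty.insert "poultry" poultry_).insert "beef" beef_).insert "pork" pork_).insert "fish" fish_).insert "seafood" seafood_
  -- label_map[label] raises KeyError on a key outside the map: Pre_ excludes those label_names
  let all_labels := label_names.foldl (fun acc label => acc ++ [label_map.getD label 0]) []
  let veg : Int := if all_labels.any (fun x => x ≠ 0) then 0 else 1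
  all_labels ++ [veg]

-- ===== PORT B =====
def pvPOULTRY : List String := ["chicken", "turkey", "duck", "quail", "thigh", "breast"]
def pvBEEF : List String := ["beef", "steak", "ribeye", "sirloin", "oxtail", "brisket", "bison", "dog", "gyoza", "lamb"]
def pvPORK : List String := ["pork", "bacon", "ham", "sausage", "dog", "spam", "rib", "pastrami", "prosciutto"]
def pvFISH : List String := ["fish", "tilapia", "salmon", "cod", "flounder", "tuna", "sardine", "barramundi", "branzino", "porgies", "bass"]
def pvSEAFOOD : List String := ["shrimp", "octopus", "oysters", "clam", "abalone", "squid", "calamari", "seafood", "crab", "lobster", "mussel", "scallop", "snail"]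
def pvEXCLUDE : List String := ["chicken stock", "fish sauce"]

def pvAltStep (st : Int × Int × Int × Int × Int) (i : String) : Int × Int × Int × Int × Int :=
  let l := PySem.Str.lower i
  if pvEXCLUDE.any (fun e => PySem.Str.isIn e l) then st
  else
    (if pvPOULTRY.any (fun w => PySem.Str.isIn w l) then 1 else st.1,
     if pvBEEF.any (fun w => PySem.Str.isIn w l) then 1 else st.2.1,
     if pvPORK.any (fun w => PySem.Str.isIn w l) then 1 else st.2.2.1,
     if pvFISH.any (fun w => PySem.Str.isIn w l) then 1 else st.2.2.2.1,
     if pvSEAFOOD.any (fun w => PySem.Str.isIn w l) then 1 else st.2.2.2.2)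

def label_all_meats_alt (ing : List String) (label_names : List String) : List Int :=
  let fl := ing.foldl pvAltStep (0, 0, 0, 0, 0)
  let label_map : PySem.Dict String Int :=
    ((((PySem.Dict.empty.insert "poultry" fl.1).insert "beef" fl.2.1).insert "pork" fl.2.2.1).insert "fish" fl.2.2.2.1).insert "seafood" fl.2.2.2.2
  let all_labels := label_names.map (fun label => label_map.getD label 0)
  all_labels ++ [if all_labels.any (fun x => x ≠ 0) then (0 : Int) else 1]

-- ===== PRECONDITION & SPEC =====
-- Pre_ excludes label_names containing a key outside the five-category map, where Python A raises KeyError.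
def Pre_label_all_meats (ing : List String) (label_names : List String) : Prop :=
  ∀ l ∈ label_names, l ∈ ["poultry", "beef", "pork", "fish", "seafood"]
instance (ing : List String) (label_names : List String) : Decidable (Pre_label_all_meats ing label_names) := by unfold Pre_label_all_meats; infer_instance

def pvWitness_label_all_meats : List String × List String := (["chicken soup", "Fish sauce"], ["poultry", "fish", "poultry"])

def Spec_label_all_meats (ing : List String) (label_names : List String) (out : List Int) : Prop := out = label_all_meats_alt ing label_names
instance (ing : List String) (label_names : List String) (out : List Int) : Decidable (Spec_label_all_meats ing label_names out) := by unfold Spec_label_all_meats; infer_instance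

-- ===== CLAIM (what is proved, stated in full; the proofs are below) =====
def Claim_equal_label_all_meats : Prop := ∀ (ing : List String) (label_names : List String), Dom_label_all_meats ing label_names → Pre_label_all_meats ing label_names → Spec_label_all_meats ing label_names (label_all_meats ing label_names)

-- ===== LEMMAS AND PROOFS =====

-- label_meat only returns 0 or 1
theorem label_meat_zero_or_one (ing include_ exclude : List String) :
    label_meat ing include_ exclude = 0 ∨ label_meat ing include_ exclude = 1 := by
  induction ing with
  | nil => left; rfl
  | cons i rest ih =>
    simp only [label_meat]
    split
    · right; rfl
    · exact ih

-- when an exclude term occurs in l, A's per-ingredient condition is false for any keyword list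
theorem cond_false_of_exclude (l : String) (cat : List String)
    (h : pvEXCLUDE.any (fun e => PySem.Str.isIn e l) = true) :
    cat.any (fun meat => PySem.Str.isIn meat l && pvEXCLUDE.all (fun e => !(PySem.Str.isIn e l))) = false := by
  simp only [List.any_eq_true] at h
  obtain ⟨e, he, hi⟩ := h
  simp only [List.any_eq_false, Bool.and_eq_true, not_and, List.all_eq_true]
  intro m _ _ hall
  have h2 := hall e he
  rw [hi] at h2
  exact absurd h2 (by decide)

-- the one-pass fold computes, in each component, exactly the corresponding label_meat scan
theorem fold_eq (ing : List String) (st : Int × Int × Int × Int × Int) :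
    ing.foldl pvAltStep st =
      ((if label_meat ing pvPOULTRY pvEXCLUDE = 1 then 1 else st.1),
       (if label_meat ing pvBEEF pvEXCLUDE = 1 then 1 else st.2.1),
       (if label_meat ing pvPORK pvEXCLUDE = 1 then 1 else st.2.2.1),
       (if label_meat ing pvFISH pvEXCLUDE = 1 then 1 else st.2.2.2.1),
       (if label_meat ing pvSEAFOOD pvEXCLUDE = 1 then 1 else st.2.2.2.2)) := by
  induction ing generalizing st with
  | nil => simp [label_meat]
  | cons i rest ih =>
    rw [List.foldl_cons, ih]
    by_cases hex : pvEXCLUDE.any (fun e => PySem.Str.isIn e (PySem.Str.lower i)) = true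
    · simp only [pvAltStep, hex, if_true, label_meat,
        cond_false_of_exclude (PySem.Str.lower i) _ hex]
      simp
    · have hall : pvEXCLUDE.all (fun e => !(PySem.Str.isIn e (PySem.Str.lower i))) = true := by
        simp only [List.all_eq_true]
        intro e he
        cases h : PySem.Str.isIn e (PySem.Str.lower i)
        · rfl
        · exact absurd (List.any_eq_true.mpr ⟨e, he, h⟩) hex
      simp only [Bool.not_eq_true] at hex
      simp only [pvAltStep, hex, label_meat, hall, Bool.and_true]
      refine Prod.ext ?_ (Prod.ext ?_ (Prod.ext ?_ (Prod.ext ?_ ?_))) <;>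
        · simp only
          split <;> split <;> simp_all

theorem if_label_meat_eq (ing inc exc : List String) :
    (if label_meat ing inc exc = 1 then (1 : Int) else 0) = label_meat ing inc exc := by
  rcases label_meat_zero_or_one ing inc exc with h | h <;> simp [h]

-- ===== VERDICT (by name: the statement is the Claim_ definition above) =====
theorem label_all_meats_spec : Claim_equal_label_all_meats := by
  intro ing label_names _ _
  unfold Spec_label_all_meats label_all_meats label_all_meats_alt
  rw [fold_eq]
  simp only [pvPOULTRY, pvBEEF, pvPORK, pvFISH, pvSEAFOOD, pvEXCLUDE, if_label_meat_eq]
  rw [PySem.List.foldl_append_singleton_eq_map]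
  simp only [List.nil_append]
  rfl
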